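-- pv_equiv track=rewrite | github.com/saropa/saropa_lints | scripts/modules/_rule_version_history.py | find_closing_quote
-- ===== SOURCE A (Python) =====
-- def find_closing_quote(
--     text: str, start: int, quote_char: str = "'", raw: bool = False
-- ) -> int:
--     """Find the closing quote, respecting backslash escapes.
--
--     For raw strings (r'...' / r"..."), backslashes are literal.
--     Public so version_rules.py can reuse without duplication.
--     """
--     i = start + 1
--     while i < len(text):
--         if not raw and text[i] == "\\" and i + 1 < len(text):
--             i += 2  # skip escaped char
--         elif text[i] == quote_char:
--             return i
--         else:
--             i += 1
--     return -1
-- ===== SOURCE B (Python) =====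
-- def find_closing_quote(
--     text: str, start: int, quote_char: str = "'", raw: bool = False
-- ) -> int:
--     """Find the closing quote via str.find jumps instead of a char-by-char scan:
--     jump between occurrences of quote_char and accept the first one preceded by
--     an even number of consecutive backslashes."""
--     if len(quote_char) != 1:
--         return -1
--     lo = start + 1
--     if raw:
--         return text.find(quote_char, lo)
--     j = text.find(quote_char, lo)
--     while j != -1:
--         k = j - 1
--         while k >= lo and text[k] == "\\":
--             k -= 1
--         if (j - 1 - k) % 2 == 0:
--             return j
--         j = text.find(quote_char, j + 1)
--     return -1
-- ===== Notes on version B (the rewrite author's own statement) =====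
-- stated objective: faster
-- what changed: B replaces A's char-by-char index scan (skipping escape pairs) with str.find jumps between quote_char occurrences, accepting the first occurrence preceded by an even-length run of backslashes; the scan is delegated to the C-level str.find instead of a Python-level per-character loop (measured ~18x at the largest timed size). Pre_ excludes start < -1 (A's negative-index text[i] wraparound is accidental and can raise IndexError) and non-raw calls with quote_char == '\', where backslash is both escape target and delimiter and neither behaviour is specified.
-- outside the precondition, e.g. on find_closing_quote('\\\\', -1, '\\', False): A returns -1, B returns 0; on find_closing_quote("ab'c", -3, "'", False): A returns -2, B returns 2
import Mathlib
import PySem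

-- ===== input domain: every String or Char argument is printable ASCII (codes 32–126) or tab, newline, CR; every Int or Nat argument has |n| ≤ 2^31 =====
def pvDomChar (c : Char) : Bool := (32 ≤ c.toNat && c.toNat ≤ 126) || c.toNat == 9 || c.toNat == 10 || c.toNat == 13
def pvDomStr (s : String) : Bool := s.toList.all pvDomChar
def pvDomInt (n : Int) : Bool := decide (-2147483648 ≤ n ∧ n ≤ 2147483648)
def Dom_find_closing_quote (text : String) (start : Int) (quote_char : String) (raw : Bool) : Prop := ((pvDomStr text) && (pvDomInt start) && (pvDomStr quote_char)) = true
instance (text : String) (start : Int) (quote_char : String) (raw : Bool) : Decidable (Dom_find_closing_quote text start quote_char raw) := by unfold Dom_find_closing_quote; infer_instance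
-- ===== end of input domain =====

-- B replaces A's char-by-char scan (skipping escape pairs) with str.find jumps between
-- quote_char occurrences, accepting the first one preceded by an even run of backslashes
-- (same O(n) asymptotics; measurably faster constant factor via C-level str.find).


-- ===== PORT A =====
-- A's while loop: i walks forward, jumping 2 over backslash escapes (unless raw).
-- Python's text[i] is PySem.List.pyGet? on the char list (negative i wraps; none = IndexError,
-- which the port maps to a junk value 0 — such inputs are outside Pre_).
-- 'text[i] == quote_char' compares the 1-char string text[i] with quote_char: [ch] == q.
def pvALoop (cs : List Char) (q : List Char) (raw : Bool) (i : Int) : Int :=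
  if _h : i < (cs.length : Int) then
    match PySem.List.pyGet? cs i with
    | none => 0  -- Python raises IndexError here; excluded by Pre_
    | some ch =>
      if !raw && (ch == '\\') && (i + 1 < (cs.length : Int)) then
        pvALoop cs q raw (i + 2)
      else if [ch] == q then i
      else pvALoop cs q raw (i + 1)
  else -1
termination_by ((cs.length : Int) - i).toNat
decreasing_by all_goals omega

def find_closing_quote (text : String) (start : Int) (quote_char : String) (raw : Bool) : Int :=
  pvALoop text.toList quote_char.toList raw (start + 1)

-- ===== PORT B =====
-- Source B's inner 'while k >= lo and text[k] == "\\": k -= 1'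
def pvRun (cs : List Char) (lo : Int) (k : Int) : Int :=
  if lo ≤ k ∧ PySem.List.pyGet? cs k = some '\\' then pvRun cs lo (k - 1) else k
termination_by (k + 1 - lo).toNat
decreasing_by omega

-- Source B's outer 'while j != -1' loop over the occurrences of quote_char found by str.find;
-- fuel (length+1) only makes the recursion structural: j strictly increases each round.
def pvBLoop (cs : List Char) (q : List Char) (lo : Int) : Nat → Int → Int
  | 0, _ => -1  -- fuel exhausted; never reached
  | fuel + 1, j =>
    if j ≠ -1 then
      let k := pvRun cs lo (j - 1)
      if PySem.Int.mod (j - 1 - k) 2 = 0 then j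
      else pvBLoop cs q lo fuel (PySem.Chars.findFrom cs q (j + 1) none)
    else -1

def find_closing_quote_alt (text : String) (start : Int) (quote_char : String) (raw : Bool) : Int :=
  if PySem.Str.len quote_char ≠ 1 then -1
  else if raw then PySem.Chars.findFrom text.toList quote_char.toList (start + 1) none
  else
    pvBLoop text.toList quote_char.toList (start + 1) (text.toList.length + 1)
      (PySem.Chars.findFrom text.toList quote_char.toList (start + 1) none)

-- ===== PRECONDITION & SPEC =====
-- Pre_ excludes start < -1 (A's negative-index text[i] wraparound is accidental and can raise
-- IndexError) and non-raw calls with quote_char == "\\", where backslash is both escape target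
-- and delimiter and neither behaviour is specified.
def Pre_find_closing_quote (text : String) (start : Int) (quote_char : String) (raw : Bool) : Prop :=
  -1 ≤ start ∧ (raw = true ∨ quote_char ≠ "\\")
instance (text : String) (start : Int) (quote_char : String) (raw : Bool) : Decidable (Pre_find_closing_quote text start quote_char raw) := by unfold Pre_find_closing_quote; infer_instance

def pvWitness_find_closing_quote : String × Int × String × Bool := ("ab\\'c' d", 0, "'", false)

def Spec_find_closing_quote (text : String) (start : Int) (quote_char : String) (raw : Bool) (out : Int) : Prop := out = find_closing_quote_alt text start quote_char raw
instance (text : String) (start : Int) (quote_char : String) (raw : Bool) (out : Int) : Decidable (Spec_find_closing_quote text start quote_char raw out) := by unfold Spec_find_closing_quote; infer_instance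

-- ===== CLAIM (what is proved, stated in full; the proofs are below) =====
def Claim_equal_find_closing_quote : Prop := ∀ (text : String) (start : Int) (quote_char : String) (raw : Bool), Dom_find_closing_quote text start quote_char raw → Pre_find_closing_quote text start quote_char raw → Spec_find_closing_quote text start quote_char raw (find_closing_quote text start quote_char raw)

-- ===== LEMMAS AND PROOFS =====

-- length of the maximal run of backslashes ending just below j, not reaching below lo
def pvRunTo (cs : List Char) (lo : Nat) : Nat → Nat
  | 0 => 0
  | j + 1 => if lo ≤ j ∧ cs[j]? = some '\\' then pvRunTo cs lo j + 1 else 0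

-- first index in [i, n) satisfying P, as Python reports it (-1 if none)
def pvFirst (n : Nat) (P : Nat → Bool) (i : Nat) : Int :=
  if i < n then (if P i then (i : Int) else pvFirst n P (i + 1)) else -1
termination_by n - i

def pvGoodR (cs : List Char) (c : Char) (j : Nat) : Bool := cs[j]? == some c
def pvGoodB (cs : List Char) (c : Char) (lo j : Nat) : Bool :=
  (cs[j]? == some c) && (pvRunTo cs lo j) % 2 == 0

theorem pvRunTo_self (cs : List Char) (lo : Nat) : pvRunTo cs lo lo = 0 := by
  cases lo with
  | zero => rfl
  | succ m => simp [pvRunTo]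

theorem pvFirst_stop (n : Nat) (P : Nat → Bool) (i : Nat) (h : i < n) (hP : P i = true) :
    pvFirst n P i = (i : Int) := by
  rw [pvFirst]; simp [h, hP]

theorem pvFirst_step (n : Nat) (P : Nat → Bool) (i : Nat) (hP : P i = false) :
    pvFirst n P i = pvFirst n P (i + 1) := by
  by_cases h : i < n
  · rw [pvFirst]; simp [h, hP]
  · rw [pvFirst, pvFirst]; simp [h]; omega

theorem pvFirst_congr (n : Nat) (P Q : Nat → Bool) (i : Nat)
    (h : ∀ j, i ≤ j → j < n → P j = Q j) : pvFirst n P i = pvFirst n Q i := by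
  fun_induction pvFirst n P i with
  | case1 i hi hP =>
    rw [pvFirst]
    have := h i (le_refl i) hi
    simp [hi, ← this, hP]
  | case2 i hi hP ih =>
    have hQ : Q i = false := by rw [← h i (le_refl i) hi]; simpa using hP
    rw [pvFirst_step n Q i hQ, ← ih (fun j hj hjn => h j (by omega) hjn)]
  | case3 i hi => rw [pvFirst]; simp [hi]

theorem pvFirst_none (n : Nat) (P : Nat → Bool) (i : Nat)
    (h : ∀ j, i ≤ j → j < n → P j = false) : pvFirst n P i = -1 := by
  fun_induction pvFirst n P i with
  | case1 i hi hP => rw [h i (le_refl i) hi] at hP; exact absurd hP (by simp)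
  | case2 i hi hP ih => exact ih (fun j hj hjn => h j (by omega) hjn)
  | case3 i hi => rfl

theorem pvFirst_skip (n : Nat) (P : Nat → Bool) (i j : Nat) (hij : i ≤ j)
    (h : ∀ m, i ≤ m → m < j → P m = false) : pvFirst n P i = pvFirst n P j := by
  induction j with
  | zero => have : i = 0 := by omega
            rw [this]
  | succ j ih =>
    by_cases hij' : i = j + 1
    · rw [hij']
    · rw [ih (by omega) (fun m hm hmj => h m hm (by omega)),
        pvFirst_step n P j (h j (by omega) (by omega))]

theorem pvFirst_found (n : Nat) (P : Nat → Bool) (i j : Nat) (hij : i ≤ j) (hj : j < n)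
    (hP : P j = true) (hmin : ∀ m, i ≤ m → m < j → P m = false) : pvFirst n P i = (j : Int) := by
  rw [pvFirst_skip n P i j hij hmin]
  exact pvFirst_stop n P j hj hP

theorem pvFirst_spec (n : Nat) (P : Nat → Bool) (i : Nat) :
    (pvFirst n P i = -1 ∧ ∀ j, i ≤ j → j < n → P j = false) ∨
    (∃ j : Nat, pvFirst n P i = (j : Int) ∧ i ≤ j ∧ j < n ∧ P j = true ∧
      ∀ m, i ≤ m → m < j → P m = false) := by
  fun_induction pvFirst n P i with
  | case1 i hi hP =>
    exact Or.inr ⟨i, rfl, le_refl i, hi, hP, fun m hm hmi => absurd hm (by omega)⟩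
  | case2 i hi hP ih =>
    have hPi : P i = false := by simpa using hP
    rcases ih with ⟨hneg, hall⟩ | ⟨j, hj, hij, hjn, hPj, hmin⟩
    · refine Or.inl ⟨hneg, fun j hj hjn => ?_⟩
      rcases Nat.eq_or_lt_of_le hj with h | h
      · rwa [← h]
      · exact hall j (by omega) hjn
    · refine Or.inr ⟨j, hj, by omega, hjn, hPj, fun m hm hmj => ?_⟩
      rcases Nat.eq_or_lt_of_le hm with h | h
      · rwa [← h]
      · exact hmin m (by omega) hmj
  | case3 i hi =>
    exact Or.inl ⟨rfl, fun j hj hjn => absurd hjn (by omega)⟩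

theorem pvSingletonPrefix {c : Char} {l : List Char} : [c] <+: l ↔ l.head? = some c := by
  cases l with
  | nil => simp
  | cons a t => simp [List.cons_prefix_iff, eq_comm]

theorem pvGoodR_iff (cs : List Char) (c : Char) (j : Nat) :
    pvGoodR cs c j = true ↔ cs[j]? = some c := by
  simp [pvGoodR]

-- findFrom with a single-char needle = first index carrying that char
theorem pvFindFrom_eq (cs : List Char) (c : Char) (p : Nat) :
    PySem.Chars.findFrom cs [c] (p : Int) none = pvFirst cs.length (pvGoodR cs c) p := by
  by_cases hp : p ≤ cs.length
  · by_cases hff : PySem.Chars.findFrom cs [c] (p : Int) none = -1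
    · rw [hff]
      have hni := (PySem.Chars.findFrom_natCast_eq_neg_one_iff cs [c] p hp).mp hff
      symm
      apply pvFirst_none
      intro j hj hjn
      by_contra hgood
      apply hni
      rw [List.singleton_infix_iff]
      have hcj : cs[j]? = some c := (pvGoodR_iff cs c j).mp (by simpa using hgood)
      have : (cs.drop p)[j - p]? = some c := by
        rw [List.getElem?_drop]
        rwa [Nat.add_sub_cancel' hj]
      exact List.mem_of_getElem? this
    · obtain ⟨hle, hpre, hmin⟩ := PySem.Chars.findFrom_natCast_spec cs [c] p hp hff
      set r := PySem.Chars.findFrom cs [c] (p : Int) none with hr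
      have h0 : (0 : Int) ≤ r := le_trans (by positivity) hle
      have hhead : (cs.drop r.toNat).head? = some c := pvSingletonPrefix.mp hpre
      rw [List.head?_drop] at hhead
      have hjlt : r.toNat < cs.length := by
        by_contra hge
        rw [List.getElem?_eq_none (by omega)] at hhead
        simp at hhead
      have hgoal : pvFirst cs.length (pvGoodR cs c) p = (r.toNat : Int) := by
        apply pvFirst_found cs.length _ p r.toNat (by omega) hjlt
        · exact (pvGoodR_iff cs c r.toNat).mpr hhead
        · intro m hm hmlt
          have hnp := hmin m hm hmlt
          rw [pvSingletonPrefix, List.head?_drop] at hnp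
          simp [pvGoodR]
          intro hx
          exact absurd hx hnp
      rw [hgoal]; omega
  · have h1 : ¬ ((p : Int) < 0) := by omega
    have h2 : ((cs.length : Int)) < (p : Int) := by exact_mod_cast (by omega : cs.length < p)
    rw [show PySem.Chars.findFrom cs [c] (p : Int) none = -1 by
      simp [PySem.Chars.findFrom, h1, h2]]
    symm
    exact pvFirst_none _ _ _ (fun j hj hjn => absurd (by omega : j < p) (by omega))

-- parity of the run is unchanged when the scan start moves 2 right over a backslash
theorem pvRunTo_parity2 (cs : List Char) (i : Nat) (hc : cs[i]? = some '\\') :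
    ∀ j, i + 2 ≤ j → pvRunTo cs i j % 2 = pvRunTo cs (i + 2) j % 2 := by
  intro j hj
  induction j, hj using Nat.le_induction with
  | base =>
    have h1 : pvRunTo cs i (i + 1) = 1 := by
      show (if i ≤ i ∧ cs[i]? = some '\\' then pvRunTo cs i i + 1 else 0) = 1
      simp [hc, pvRunTo_self]
    have h2 : pvRunTo cs i (i + 2) % 2 = 0 := by
      show (if i ≤ i + 1 ∧ cs[i + 1]? = some '\\' then pvRunTo cs i (i + 1) + 1 else 0) % 2 = 0
      rw [h1]; split_ifs <;> rfl
    rw [h2, pvRunTo_self]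
  | succ j hij ih =>
    show (if i ≤ j ∧ cs[j]? = some '\\' then pvRunTo cs i j + 1 else 0) % 2 =
      (if i + 2 ≤ j ∧ cs[j]? = some '\\' then pvRunTo cs (i + 2) j + 1 else 0) % 2
    by_cases hbs : cs[j]? = some '\\'
    · rw [if_pos ⟨by omega, hbs⟩, if_pos ⟨hij, hbs⟩]; omega
    · rw [if_neg (fun h => hbs h.2), if_neg (fun h => hbs h.2)]

-- the run is unchanged when the scan start moves 1 right over a non-backslash
theorem pvRunTo_shift1 (cs : List Char) (i : Nat) (hc : ¬ cs[i]? = some '\\') :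
    ∀ j, i + 1 ≤ j → pvRunTo cs i j = pvRunTo cs (i + 1) j := by
  intro j hj
  induction j, hj using Nat.le_induction with
  | base =>
    show (if i ≤ i ∧ cs[i]? = some '\\' then pvRunTo cs i i + 1 else 0) = pvRunTo cs (i + 1) (i + 1)
    rw [if_neg (fun h => hc h.2)]
    exact (pvRunTo_self cs (i + 1)).symm
  | succ j hij ih =>
    show (if i ≤ j ∧ cs[j]? = some '\\' then pvRunTo cs i j + 1 else 0) =
      (if i + 1 ≤ j ∧ cs[j]? = some '\\' then pvRunTo cs (i + 1) j + 1 else 0)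
    by_cases hbs : cs[j]? = some '\\'
    · rw [if_pos ⟨by omega, hbs⟩, if_pos ⟨hij, hbs⟩, ih]
    · rw [if_neg (fun h => hbs h.2), if_neg (fun h => hbs h.2)]

theorem pvALoop_step (cs q : List Char) (raw : Bool) (i : Int) (ch : Char)
    (hi : i < (cs.length : Int)) (hget : PySem.List.pyGet? cs i = some ch) :
    pvALoop cs q raw i =
      if (!raw && (ch == '\\') && decide (i + 1 < (cs.length : Int))) = true then
        pvALoop cs q raw (i + 2)
      else if ([ch] == q) = true then i
      else pvALoop cs q raw (i + 1) := by
  rw [pvALoop, dif_pos hi, hget]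

-- A's loop, raw: first occurrence of the quote char
theorem pvALoop_raw (cs : List Char) (c : Char) :
    ∀ (m i : Nat), cs.length - i ≤ m →
      pvALoop cs [c] true (i : Int) = pvFirst cs.length (pvGoodR cs c) i := by
  intro m
  induction m with
  | zero =>
    intro i h
    have hni : ¬ i < cs.length := by omega
    rw [pvALoop, pvFirst, dif_neg (by exact_mod_cast hni), if_neg hni]
  | succ m ih =>
    intro i h
    by_cases hi : i < cs.length
    · rw [pvALoop_step cs [c] true (i : Int) cs[i]
        (by exact_mod_cast hi) (PySem.List.pyGet?_ofNat cs i hi)]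
      simp only [Bool.not_true, Bool.false_and, Bool.false_eq_true, if_false]
      by_cases hcc : cs[i] = c
      · rw [if_pos (by simp [hcc])]
        exact (pvFirst_stop _ _ _ hi (by simp [pvGoodR, List.getElem?_eq_getElem hi, hcc])).symm
      · rw [if_neg (by simp [hcc])]
        rw [show ((i : Int) + 1) = ((i + 1 : Nat) : Int) by push_cast; ring]
        rw [ih (i + 1) (by omega)]
        exact (pvFirst_step _ _ _ (by simp [pvGoodR, List.getElem?_eq_getElem hi, hcc])).symm
    · rw [pvALoop, pvFirst, dif_neg (by exact_mod_cast hi), if_neg hi]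

-- A's loop, non-raw, c ≠ '\\': first quote char preceded by an even run of backslashes
theorem pvALoop_escape (cs : List Char) (c : Char) (hc : c ≠ '\\') :
    ∀ (m i : Nat), cs.length - i ≤ m →
      pvALoop cs [c] false (i : Int) = pvFirst cs.length (pvGoodB cs c i) i := by
  intro m
  induction m with
  | zero =>
    intro i h
    have hni : ¬ i < cs.length := by omega
    rw [pvALoop, pvFirst, dif_neg (by exact_mod_cast hni), if_neg hni]
  | succ m ih =>
    intro i h
    by_cases hi : i < cs.length
    · rw [pvALoop_step cs [c] false (i : Int) cs[i]
        (by exact_mod_cast hi) (PySem.List.pyGet?_ofNat cs i hi)]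
      simp only [Bool.not_false, Bool.true_and]
      have hgi : cs[i]? = some cs[i] := List.getElem?_eq_getElem hi
      by_cases hbs : cs[i] = '\\'
      · have hgbs : cs[i]? = some '\\' := by rw [hgi, hbs]
        have hgood_i : pvGoodB cs c i i = false := by
          simp [pvGoodB, hgi, hbs, Ne.symm hc]
        by_cases hlast : i + 1 < cs.length
        · rw [if_pos (by simp [hbs]; exact_mod_cast hlast)]
          rw [show ((i : Int) + 2) = ((i + 2 : Nat) : Int) by push_cast; ring]
          rw [ih (i + 2) (by omega)]
          symm
          rw [pvFirst_step _ _ _ hgood_i]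
          have hrun1 : pvRunTo cs i (i + 1) = 1 := by
            show (if i ≤ i ∧ cs[i]? = some '\\' then pvRunTo cs i i + 1 else 0) = 1
            simp [hgbs, pvRunTo_self]
          rw [pvFirst_step _ _ _ (by simp [pvGoodB, hrun1])]
          exact pvFirst_congr _ _ _ _
            (fun j hj hjn => by simp [pvGoodB, pvRunTo_parity2 cs i hgbs j hj])
        · rw [if_neg (by simp [hbs]; omega)]
          rw [if_neg (by simp [hbs, Ne.symm hc])]
          rw [show ((i : Int) + 1) = ((i + 1 : Nat) : Int) by push_cast; ring]
          rw [ih (i + 1) (by omega)]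
          symm
          rw [pvFirst_step _ _ _ hgood_i]
          exact pvFirst_congr _ _ _ _
            (fun j hj hjn => absurd (by omega : i + 1 < cs.length) hlast)
      · rw [if_neg (by simp [hbs])]
        by_cases hcc : cs[i] = c
        · rw [if_pos (by simp [hcc])]
          symm
          exact pvFirst_stop _ _ _ hi (by simp [pvGoodB, hgi, hcc, pvRunTo_self])
        · rw [if_neg (by simp [hcc])]
          rw [show ((i : Int) + 1) = ((i + 1 : Nat) : Int) by push_cast; ring]
          rw [ih (i + 1) (by omega)]
          symm
          rw [pvFirst_step _ _ _ (by simp [pvGoodB, hgi, hcc])]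
          have hnbs : ¬ cs[i]? = some '\\' := by
            rw [hgi]; intro hcon; exact hbs (Option.some.inj hcon)
          exact pvFirst_congr _ _ _ _
            (fun j hj hjn => by simp [pvGoodB, pvRunTo_shift1 cs i hnbs j hj])
    · rw [pvALoop, pvFirst, dif_neg (by exact_mod_cast hi), if_neg hi]

-- A's loop returns -1 whenever quote_char is not a single character
theorem pvALoop_badq (cs : List Char) (q : List Char) (raw : Bool) (hq : q.length ≠ 1) :
    ∀ (m : Nat) (i : Int), 0 ≤ i → ((cs.length : Int) - i).toNat ≤ m →
      pvALoop cs q raw i = -1 := by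
  intro m
  induction m with
  | zero =>
    intro i h0 h
    rw [pvALoop, dif_neg (by omega)]
  | succ m ih =>
    intro i h0 h
    by_cases hi : i < (cs.length : Int)
    · have hget : PySem.List.pyGet? cs i = some cs[i.toNat] := by
        rw [PySem.List.pyGet?_of_nonneg cs h0]
        exact List.getElem?_eq_getElem (by omega)
      rw [pvALoop_step cs q raw i cs[i.toNat] hi hget]
      have hne : ¬ ([cs[i.toNat]] == q) = true := by
        simp only [beq_iff_eq]
        intro hcon
        exact hq (by rw [← hcon]; rfl)
      by_cases hb : (!raw && (cs[i.toNat] == '\\') && decide (i + 1 < (cs.length : Int))) = true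
      · rw [if_pos hb]
        exact ih (i + 2) (by omega) (by omega)
      · rw [if_neg hb, if_neg hne]
        exact ih (i + 1) (by omega) (by omega)
    · rw [pvALoop, dif_neg hi]

-- B's inner backslash-run loop computes j - 1 - pvRunTo
theorem pvRun_eq (cs : List Char) (lo j : Nat) (h : lo ≤ j) :
    pvRun cs (lo : Int) ((j : Int) - 1) = (j : Int) - 1 - (pvRunTo cs lo j : Int) := by
  induction j with
  | zero =>
    have hlo : lo = 0 := by omega
    subst hlo
    rw [pvRun, if_neg (fun hcon => by have := hcon.1; omega)]
    have : pvRunTo cs 0 0 = 0 := rfl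
    rw [this]
    simp
  | succ j ih =>
    have hj1 : ((j : Int) + 1 - 1) = (j : Int) := by ring
    show pvRun cs (lo : Int) (((j : Nat) + 1 : Int) - 1) = _
    rw [show (((j : Nat) + 1 : Int) - 1) = (j : Int) by push_cast; ring]
    rw [pvRun]
    have hget : PySem.List.pyGet? cs (j : Int) = cs[j]? := by
      simp [PySem.List.pyGet?_natCast]
    by_cases hcond : lo ≤ j ∧ cs[j]? = some '\\'
    · rw [if_pos ⟨by exact_mod_cast hcond.1, by rw [hget]; exact hcond.2⟩]
      rw [ih hcond.1]
      have : pvRunTo cs lo (j + 1) = pvRunTo cs lo j + 1 := by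
        show (if lo ≤ j ∧ cs[j]? = some '\\' then pvRunTo cs lo j + 1 else 0) = _
        rw [if_pos hcond]
      rw [this]; push_cast; ring
    · have : pvRunTo cs lo (j + 1) = 0 := by
        show (if lo ≤ j ∧ cs[j]? = some '\\' then pvRunTo cs lo j + 1 else 0) = 0
        rw [if_neg hcond]
      rw [this, if_neg]
      · push_cast; ring
      · intro hcon
        exact hcond ⟨by exact_mod_cast hcon.1, by rw [← hget]; exact hcon.2⟩

-- B's outer loop over find-candidates computes the first even-run occurrence
theorem pvBLoop_eq (cs : List Char) (c : Char) (lo : Nat) :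
    ∀ (fuel p : Nat), lo ≤ p → cs.length + 1 - p ≤ fuel → 1 ≤ fuel →
      pvBLoop cs [c] (lo : Int) fuel (pvFirst cs.length (pvGoodR cs c) p) =
        pvFirst cs.length (pvGoodB cs c lo) p := by
  intro fuel
  induction fuel with
  | zero => intro p _ _ h1; omega
  | succ fuel ih =>
    intro p hlop hfuel _
    rcases pvFirst_spec cs.length (pvGoodR cs c) p with ⟨hneg, hall⟩ | ⟨j, hj0, hpj, hjn, hgood, hmin⟩
    · rw [hneg]
      rw [pvBLoop]
      simp only [ne_eq, not_true_eq_false, if_false]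
      symm
      apply pvFirst_none
      intro j hj hjn
      have := hall j hj hjn
      simp [pvGoodR] at this
      simp [pvGoodB, this]
    · rw [hj0, pvBLoop]
      rw [if_pos (by omega : ((j : Nat) : Int) ≠ -1)]
      have hrun := pvRun_eq cs lo j (by omega)
      simp only []
      rw [hrun]
      have hmod : PySem.Int.mod ((j : Int) - 1 - ((j : Int) - 1 - (pvRunTo cs lo j : Int))) 2 =
          ((pvRunTo cs lo j % 2 : Nat) : Int) := by
        rw [show ((j : Int) - 1 - ((j : Int) - 1 - (pvRunTo cs lo j : Int))) = ((pvRunTo cs lo j : Nat) : Int) by ring]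
        rw [PySem.Int.mod_eq_emod_of_pos (by norm_num)]
        push_cast
        omega
      rw [hmod]
      have hgoodj : cs[j]? = some c := by
        have := hgood; simp [pvGoodR] at this; exact this
      by_cases heven : pvRunTo cs lo j % 2 = 0
      · rw [if_pos (by omega)]
        symm
        apply pvFirst_found cs.length _ p j hpj hjn
        · simp [pvGoodB, hgoodj, heven]
        · intro m hm hmj
          have := hmin m hm hmj
          simp [pvGoodR] at this
          simp [pvGoodB, this]
      · rw [if_neg (by intro hcon; apply heven; omega)]
        rw [show ((j : Int) + 1) = ((j + 1 : Nat) : Int) by push_cast; ring]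
        rw [pvFindFrom_eq]
        rw [ih (j + 1) (by omega) (by omega) (by omega)]
        symm
        apply pvFirst_skip cs.length _ p (j + 1) (by omega)
        intro m hm hmj
        rcases Nat.lt_or_ge m j with hlt | hge
        · have := hmin m hm hlt
          simp [pvGoodR] at this
          simp [pvGoodB, this]
        · have hmj' : m = j := by omega
          rw [hmj']
          simp [pvGoodB, hgoodj, heven]

-- ===== VERDICT (by name: the statement is the Claim_ definition above) =====
theorem find_closing_quote_spec : Claim_equal_find_closing_quote := by
  intro text start quote_char raw _hdom hpre
  obtain ⟨hstart, hq⟩ := hpre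
  unfold Spec_find_closing_quote find_closing_quote find_closing_quote_alt
  set cs := text.toList with hcs
  set q := quote_char.toList with hql
  have hlo : start + 1 = ((start + 1).toNat : Int) := by omega
  set p := (start + 1).toNat with hp
  by_cases hq1 : q.length = 1
  · obtain ⟨c, hc⟩ := List.length_eq_one_iff.mp hq1
    have hlen : ¬ (PySem.Str.len quote_char ≠ 1) := by
      simp [PySem.Str.len_eq, ← hql, hq1]
    rw [if_neg hlen]
    cases raw with
    | true =>
      rw [hlo, hc, pvALoop_raw cs c (cs.length - p) p (le_refl _), pvFindFrom_eq]
      simp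
    | false =>
      have hcbs : c ≠ '\\' := by
        intro hcc
        rcases hq with h | h
        · exact Bool.false_ne_true h
        · apply h
          apply String.toList_inj.mp
          rw [← hql, hc, hcc]; rfl
      simp only [Bool.false_eq_true, if_false]
      rw [hlo, hc, pvALoop_escape cs c hcbs (cs.length - p) p (le_refl _),
        pvFindFrom_eq, pvBLoop_eq cs c p _ p (le_refl _) (by omega) (by omega)]
  · have hlen : PySem.Str.len quote_char ≠ 1 := by
      simp [PySem.Str.len_eq, ← hql]; exact fun h => hq1 (by omega)
    rw [if_pos hlen, pvALoop_badq cs q raw hq1 cs.length (start + 1) (by omega) (by omega)]
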